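-- pv_equiv track=rewrite | github.com/anshi-gupta/udemy-python | Sum_of_array.py | pattern_finder
-- ===== SOURCE A (Python) =====
-- def pattern_finder(nums):
--     pattern_start = 6
--     pattern_end = 9
--     length_of_nums = len(nums)
--     pattern_indices = list()
--
--     i = 0
--     while i < length_of_nums:
--         num = nums[i]
--         if num == 6:
--             start_index = i
--             index_to_start_from = start_index + 1
--             for position in range(index_to_start_from, length_of_nums):
--                 current_num = nums[position]
--                 if current_num == 9:
--                     end_index = position
--                     pattern_indices.append((start_index, end_index))
--                     i = end_index
--                     break
--         i += 1
--     return pattern_indices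
-- ===== SOURCE B (Python) =====
-- def pattern_finder(nums):
--     # Single forward pass: remember the first unmatched 6; close it at the next 9.
--     pattern_indices = []
--     pending = None
--     for i, num in enumerate(nums):
--         if num == 6:
--             if pending is None:
--                 pending = i
--         elif num == 9 and pending is not None:
--             pattern_indices.append((pending, i))
--             pending = None
--     return pattern_indices
-- ===== Notes on version B (the rewrite author's own statement) =====
-- stated objective: faster
-- what changed: Replaced the while-loop with a nested forward scan for the closing 9 (restarting the search after each 6) by a single left-to-right pass that keeps the index of the first unmatched 6 and closes it at the next 9.
import Mathlib
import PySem

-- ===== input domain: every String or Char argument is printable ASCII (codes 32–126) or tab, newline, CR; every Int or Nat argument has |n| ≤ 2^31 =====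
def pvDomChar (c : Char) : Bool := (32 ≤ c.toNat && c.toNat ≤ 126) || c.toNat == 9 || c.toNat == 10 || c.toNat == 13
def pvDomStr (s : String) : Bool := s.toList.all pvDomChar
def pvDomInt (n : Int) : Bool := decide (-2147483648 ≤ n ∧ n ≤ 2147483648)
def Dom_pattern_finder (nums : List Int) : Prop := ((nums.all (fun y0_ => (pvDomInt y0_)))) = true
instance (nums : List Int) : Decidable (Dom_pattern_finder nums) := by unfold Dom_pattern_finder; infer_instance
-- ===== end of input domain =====

-- B replaces A's quadratic while-loop (inner forward search for the closing 9 after each 6)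
-- by one left-to-right pass holding the index of the first unmatched 6: faster (worst-case O(n) vs O(n^2)).


-- ===== PORT A =====
-- inner 'for position in range(i+1, n): if nums[position] == 9: … break' — first 9 at index ≥ pos
def pfFindNine (nums : List Int) (n pos : Nat) : Option Nat :=
  if _ : pos < n then
    if nums.getD pos 0 = 9 then some pos
    else pfFindNine nums n (pos + 1)
  else none
termination_by n - pos

theorem pfFindNine_bounds (nums : List Int) (n pos e : Nat)
    (h : pfFindNine nums n pos = some e) : pos ≤ e ∧ e < n := by
  fun_induction pfFindNine nums n pos with
  | case1 p hp h9 => simp_all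
  | case2 p hp h9 ih => have := ih h; omega
  | case3 p hp => simp_all

-- outer while loop of A (index i in Python; access nums[i] is always in range here)
def pfLoop (nums : List Int) (n i : Nat) (acc : List (List Int)) : List (List Int) :=
  if _ : i < n then
    if nums.getD i 0 = 6 then
      match he : pfFindNine nums n (i + 1) with
      | some e => pfLoop nums n (e + 1) (acc ++ [[(i : Int), (e : Int)]])
      | none => pfLoop nums n (i + 1) acc
    else pfLoop nums n (i + 1) acc
  else acc
termination_by n - i
decreasing_by
  · have := pfFindNine_bounds nums n (i + 1) e he; omega
  · omega
  · omega

def pattern_finder (nums : List Int) : List (List Int) :=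
  pfLoop nums nums.length 0 []

-- ===== PORT B =====
-- single pass; `pending` = index of the first unmatched 6 since the last emitted pair
def pfScan (l : List Int) (i : Nat) (pending : Option Nat) (acc : List (List Int)) : List (List Int) :=
  match l with
  | [] => acc
  | num :: rest =>
    if num = 6 then
      match pending with
      | none => pfScan rest (i + 1) (some i) acc
      | some p => pfScan rest (i + 1) (some p) acc
    else if num = 9 then
      match pending with
      | some p => pfScan rest (i + 1) none (acc ++ [[(p : Int), (i : Int)]])
      | none => pfScan rest (i + 1) none acc
    else pfScan rest (i + 1) pending acc

def pattern_finder_alt (nums : List Int) : List (List Int) :=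
  pfScan nums 0 none []

-- ===== PRECONDITION & SPEC =====
def Spec_pattern_finder (nums : List Int) (out : List (List Int)) : Prop := out = pattern_finder_alt nums
instance (nums : List Int) (out : List (List Int)) : Decidable (Spec_pattern_finder nums out) := by unfold Spec_pattern_finder; infer_instance

-- ===== CLAIM (what is proved, stated in full; the proofs are below) =====
def Claim_equal_pattern_finder : Prop := ∀ (nums : List Int), Dom_pattern_finder nums → Spec_pattern_finder nums (pattern_finder nums)

-- ===== LEMMAS AND PROOFS =====

theorem pv_drop_cons (nums : List Int) (i : Nat) (h : i < nums.length) :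
    nums.drop i = nums[i]?.getD 0 :: nums.drop (i + 1) := by
  rw [List.getElem?_eq_getElem h, Option.getD_some]
  exact List.drop_eq_getElem_cons h

-- if there is no 9 at index ≥ i, the scan of the suffix appends nothing
theorem pfScan_no_nine (nums : List Int) (i : Nat) (hle : i ≤ nums.length)
    (hnone : pfFindNine nums nums.length i = none) :
    ∀ pending acc, pfScan (nums.drop i) i pending acc = acc := by
  generalize hk : nums.length - i = k
  induction k generalizing i with
  | zero =>
    have : i = nums.length := by omega
    subst this; simp [List.drop_length, pfScan]
  | succ k ih =>
    have hlt : i < nums.length := by omega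
    rw [pfFindNine] at hnone
    simp only [hlt, dite_true, List.getD_eq_getElem?_getD] at hnone
    by_cases h9 : nums[i]?.getD 0 = 9
    · rw [if_pos h9] at hnone; exact absurd hnone (by simp)
    · rw [if_neg h9] at hnone
      intro pending acc
      rw [pv_drop_cons nums i hlt]
      simp only [pfScan]
      have ih' := ih (i + 1) (by omega) hnone (by omega)
      by_cases h6 : nums[i]?.getD 0 = 6
      · simp only [h6, if_true]
        cases pending <;> simp [ih']
      · simp [h6, h9, ih']

-- with a pending 6 at p, the scan emits (p, e) at the first 9 e ≥ i and continues clean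
theorem pfScan_pending (nums : List Int) (i : Nat) (hle : i ≤ nums.length) (p : Nat)
    (acc : List (List Int)) :
    pfScan (nums.drop i) i (some p) acc =
      match pfFindNine nums nums.length i with
      | some e => pfScan (nums.drop (e + 1)) (e + 1) none (acc ++ [[(p : Int), (e : Int)]])
      | none => acc := by
  generalize hk : nums.length - i = k
  induction k generalizing i acc with
  | zero =>
    have : i = nums.length := by omega
    subst this
    rw [pfFindNine]
    simp [List.drop_length, pfScan]
  | succ k ih =>
    have hlt : i < nums.length := by omega
    rw [pv_drop_cons nums i hlt, pfFindNine]
    simp only [pfScan, hlt, dite_true, List.getD_eq_getElem?_getD]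
    by_cases h9 : nums[i]?.getD 0 = 9
    · have h6 : ¬ nums[i]?.getD 0 = 6 := by rw [h9]; decide
      simp [h9]
    · rw [if_neg h9]
      have ih' := ih (i + 1) (by omega) acc (by omega)
      by_cases h6 : nums[i]?.getD 0 = 6
      · simp only [h6, if_true]; exact ih'
      · simp only [h6, h9, if_false]; exact ih'

-- main bridge: A's outer loop = B's scan on the suffix with no pending 6
theorem pfLoop_eq_pfScan (nums : List Int) (i : Nat) (hle : i ≤ nums.length)
    (acc : List (List Int)) :
    pfLoop nums nums.length i acc = pfScan (nums.drop i) i none acc := by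
  rw [pfLoop]
  by_cases hlt : i < nums.length
  · rw [pv_drop_cons nums i hlt]
    simp only [hlt, dite_true, pfScan, List.getD_eq_getElem?_getD]
    by_cases h6 : nums[i]?.getD 0 = 6
    · simp only [h6, if_true]
      rw [pfScan_pending nums (i + 1) (by omega) i acc]
      cases he : pfFindNine nums nums.length (i + 1) with
      | some e =>
        have hb := pfFindNine_bounds nums nums.length (i + 1) e he
        show pfLoop nums nums.length (e + 1) (acc ++ [[(i : Int), (e : Int)]]) =
          pfScan (nums.drop (e + 1)) (e + 1) none (acc ++ [[(i : Int), (e : Int)]])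
        exact pfLoop_eq_pfScan nums (e + 1) (by omega) (acc ++ [[(i : Int), (e : Int)]])
      | none =>
        show pfLoop nums nums.length (i + 1) acc = acc
        rw [pfLoop_eq_pfScan nums (i + 1) (by omega) acc]
        exact pfScan_no_nine nums (i + 1) (by omega) he none acc
    · by_cases h9 : nums[i]?.getD 0 = 9
      · simp only [h9, if_true]
        exact pfLoop_eq_pfScan nums (i + 1) (by omega) acc
      · simp only [h6, h9, if_false]
        exact pfLoop_eq_pfScan nums (i + 1) (by omega) acc
  · simp only [hlt, dite_false]
    have : i = nums.length := by omega
    subst this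
    simp [List.drop_length, pfScan]
termination_by nums.length - i
decreasing_by all_goals omega

-- ===== VERDICT (by name: the statement is the Claim_ definition above) =====
theorem pattern_finder_spec : Claim_equal_pattern_finder := by
  intro nums _
  unfold Spec_pattern_finder pattern_finder pattern_finder_alt
  simpa using pfLoop_eq_pfScan nums 0 (by omega) []
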